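-- pv_equiv track=rewrite | github.com/kennyjung0223/pokemonbot | parser.py | get_roster
-- ===== SOURCE A (Python) =====
-- characters = []
--
-- def __get_single_char_info(ign):
-- 	for character in characters:
-- 		if character[1].lower() == ign.lower():
-- 			return character
--
-- 	return []
--
-- def get_roster(igns):
-- 	roster = []
-- 	for ign in igns:
-- 		if ign[0] == '[' and not ign[-1] == ']':
-- 			return []
-- 		elif ign[0] == '[' and ign[-1] == ']':
-- 			roster.append([ign])
-- 		else:
-- 			character_info = __get_single_char_info(ign)
-- 			roster.append(character_info)
--
-- 	return roster
-- ===== SOURCE B (Python) =====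
-- characters = []
--
-- def _lookup_char(ign):
--     return next((c for c in characters if c[1].lower() == ign.lower()), [])
--
-- def get_roster(igns):
--     # pass 1: validate bracket tags (same left-to-right order as A, so an
--     # empty-string IndexError still happens at the same element)
--     for ign in igns:
--         if ign[0] == '[' and ign[-1] != ']':
--             return []
--     # pass 2: build the roster
--     return [[ign] if ign[0] == '[' else _lookup_char(ign) for ign in igns]
-- ===== Notes on version B (the rewrite author's own statement) =====
-- stated objective: idiomatic
-- what changed: Replaces A's single interleaved loop (accumulating a roster while possibly discarding it on a malformed tag) by a validate-then-build two-pass shape: a validation loop that rejects malformed '['-tags, then a list comprehension; the linear helper scan becomes a next()-over-generator lookup.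
import Mathlib
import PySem

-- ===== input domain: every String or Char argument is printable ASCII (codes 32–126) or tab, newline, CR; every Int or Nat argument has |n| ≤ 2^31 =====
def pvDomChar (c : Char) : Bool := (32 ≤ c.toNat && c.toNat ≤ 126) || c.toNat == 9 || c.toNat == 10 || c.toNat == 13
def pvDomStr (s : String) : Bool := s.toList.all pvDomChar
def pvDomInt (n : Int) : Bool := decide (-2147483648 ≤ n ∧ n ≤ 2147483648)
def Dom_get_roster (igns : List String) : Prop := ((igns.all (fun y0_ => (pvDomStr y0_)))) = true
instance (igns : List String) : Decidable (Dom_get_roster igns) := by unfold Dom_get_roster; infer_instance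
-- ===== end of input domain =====

-- B restructures A's single interleaved loop into a validate-then-build two-pass shape (idiomatic).

-- ===== PORT A =====
def pyCharacters : List (List String) := []

-- the helper's for-loop over `characters` (empty module constant), step for step
def getSingleCharInfoA : List (List String) → String → List String
  | [], _ => []
  | c :: rest, ign =>
    if PySem.Str.lower ((PySem.List.pyGet? c 1).getD "") = PySem.Str.lower ign then c
    else getSingleCharInfoA rest ign

-- A's loop; ign[0] / ign[-1] via pyGet? (none = IndexError on the empty string: A stops there; excluded by Pre_)
def getRosterLoopA (roster : List (List String)) : List String → List (List String)
  | [] => roster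
  | ign :: rest =>
    match PySem.Str.pyGet? ign 0, PySem.Str.pyGet? ign (-1) with
    | some c0, some cl =>
      if c0 = '[' ∧ ¬ cl = ']' then []
      else if c0 = '[' ∧ cl = ']' then getRosterLoopA (roster ++ [[ign]]) rest
      else getRosterLoopA (roster ++ [getSingleCharInfoA pyCharacters ign]) rest
    | _, _ => []  -- IndexError

def get_roster (igns : List String) : List (List String) := getRosterLoopA [] igns

-- ===== PORT B =====
def lookupCharB (ign : String) : List String :=
  (pyCharacters.find? (fun c =>
    PySem.Str.lower ((PySem.List.pyGet? c 1).getD "") == PySem.Str.lower ign)).getD []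

def validateB : List String → Bool
  | [] => true
  | ign :: rest =>
    if (PySem.Str.pyGet? ign 0 == some '[') && !(PySem.Str.pyGet? ign (-1) == some ']') then false
    else validateB rest

def get_roster_alt (igns : List String) : List (List String) :=
  if validateB igns then
    igns.map (fun ign => if PySem.Str.pyGet? ign 0 == some '[' then [ign] else lookupCharB ign)
  else []

-- ===== PRECONDITION & SPEC =====
-- malformed bracket tag, written independently of the ports
def pvMalformed (s : String) : Bool :=
  (s.toList.head? == some '[') && !(s.toList.getLast? == some ']')

-- Pre_ excludes exactly the inputs on which A raises IndexError: an empty string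
-- occurring before any malformed '['-tag (A stops at the first malformed tag).
def Pre_get_roster (igns : List String) : Prop :=
  ("" ∉ igns.takeWhile (fun s => !(pvMalformed s)))
instance (igns : List String) : Decidable (Pre_get_roster igns) := by
  unfold Pre_get_roster; infer_instance

def pvWitness_get_roster : List String := ["[Team]", "alice"]

def Spec_get_roster (igns : List String) (out : List (List String)) : Prop := out = get_roster_alt igns
instance (igns : List String) (out : List (List String)) : Decidable (Spec_get_roster igns out) := by unfold Spec_get_roster; infer_instance

-- ===== CLAIM (what is proved, stated in full; the proofs are below) =====
def Claim_equal_get_roster : Prop := ∀ (igns : List String), Dom_get_roster igns → Pre_get_roster igns → Spec_get_roster igns (get_roster igns)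

-- ===== LEMMAS AND PROOFS =====

lemma helperA_nil (ign : String) : getSingleCharInfoA pyCharacters ign = [] := rfl

lemma lookupCharB_nil (ign : String) : lookupCharB ign = [] := rfl

lemma head_last_of_ne {ign : String} (hne : ign ≠ "") :
    ∃ c0 cl, PySem.Str.pyGet? ign 0 = some c0 ∧ PySem.Str.pyGet? ign (-1) = some cl := by
  have hl : ign.toList ≠ [] := by
    intro h
    exact hne (String.toList_inj.mp (by simp [h]))
  refine ⟨ign.toList.head hl, ign.toList.getLast hl, ?_, ?_⟩
  · simp [PySem.List.pyGet?_zero, ← List.head?_eq_getElem?, List.head?_eq_some_head hl]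
  · simp [PySem.List.pyGet?_neg_one, List.getLast?_eq_some_getLast hl]

lemma pvMalformed_false {ign : String} {c0 cl : Char}
    (h0 : PySem.Str.pyGet? ign 0 = some c0) (h1 : PySem.Str.pyGet? ign (-1) = some cl)
    (h : ¬ c0 = '[' ∨ cl = ']') : pvMalformed ign = false := by
  simp only [PySem.Str.pyGet?_eq, PySem.Chars.pyGet?_eq_listPyGet?,
    PySem.List.pyGet?_zero, PySem.List.pyGet?_neg_one] at h0 h1
  rcases h with h | h <;>
    simp [pvMalformed, List.head?_eq_getElem?, h0, h1, h]

lemma pre_tail {ign : String} {rest : List String}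
    (hm : pvMalformed ign = false) (hpre : Pre_get_roster (ign :: rest)) :
    Pre_get_roster rest := by
  unfold Pre_get_roster at hpre ⊢
  rw [List.takeWhile_cons_of_pos (by simp [hm])] at hpre
  simp only [List.mem_cons, not_or] at hpre
  exact hpre.2

lemma loopA_eq (igns : List String) : ∀ (roster : List (List String)),
    Pre_get_roster igns →
    getRosterLoopA roster igns
      = (if validateB igns then
          roster ++ igns.map (fun ign =>
            if PySem.Str.pyGet? ign 0 == some '[' then [ign] else lookupCharB ign)
         else []) := by
  induction igns with
  | nil => intro roster _; simp [getRosterLoopA, validateB]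
  | cons ign rest ih =>
    intro roster hpre
    have hne : ign ≠ "" := by
      intro h; subst h
      exact hpre (by rw [List.takeWhile_cons_of_pos (by decide)]; exact List.mem_cons_self)
    obtain ⟨c0, cl, h0, h1⟩ := head_last_of_ne hne
    simp only [getRosterLoopA, validateB, List.map_cons, h0, h1]
    by_cases hA : c0 = '['
    · by_cases hB : cl = ']'
      · have hpre' := pre_tail (pvMalformed_false h0 h1 (Or.inr hB)) hpre
        simp [hA, hB, ih _ hpre']
      · simp [hA, hB]
    · have hpre' := pre_tail (pvMalformed_false h0 h1 (Or.inl hA)) hpre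
      simp [hA, ih _ hpre', lookupCharB_nil, helperA_nil]

-- ===== VERDICT (by name: the statement is the Claim_ definition above) =====
theorem get_roster_spec : Claim_equal_get_roster := by
  intro igns _ hpre
  unfold Spec_get_roster get_roster get_roster_alt
  simpa using loopA_eq igns [] hpre
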